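-- pv_equiv track=rewrite | github.com/Minerstove/Python | cs11/Prac10/Prac10b.py | flower_heights
-- ===== SOURCE A (Python) =====
-- def flower_heights(heights, actions):
--     result = []
--     add = 0
--     prefix = [0]
--     for h in heights:
--         prefix.append(prefix[-1] + h)
--
--     for action in actions:
--         if action[0] == "water":
--             add += 2
--
--         else:
--             _, i ,j = action
--             i -= 1
--             base = prefix[j] - prefix[i]
--             days = j - i
--             result.append(base + add*days)
--
--     return result
-- ===== SOURCE B (Python) =====
-- def flower_heights(heights, actions):
--     suffix = [sum(heights[k:]) for k in range(len(heights) + 1)]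
--     result = []
--     add = 0
--     for action in actions:
--         if action[0] == "water":
--             add += 2
--         else:
--             _, i, j = action
--             i -= 1
--             result.append(suffix[i] - suffix[j] + add * (j - i))
--     return result
-- ===== Notes on version B (the rewrite author's own statement) =====
-- stated objective: alternative
-- what changed: B replaces A's incrementally grown prefix-sum table with a suffix-sum table built by a comprehension of per-entry slice sums, and answers each query as suffix[i] - suffix[j] instead of prefix[j] - prefix[i].
import Mathlib
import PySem

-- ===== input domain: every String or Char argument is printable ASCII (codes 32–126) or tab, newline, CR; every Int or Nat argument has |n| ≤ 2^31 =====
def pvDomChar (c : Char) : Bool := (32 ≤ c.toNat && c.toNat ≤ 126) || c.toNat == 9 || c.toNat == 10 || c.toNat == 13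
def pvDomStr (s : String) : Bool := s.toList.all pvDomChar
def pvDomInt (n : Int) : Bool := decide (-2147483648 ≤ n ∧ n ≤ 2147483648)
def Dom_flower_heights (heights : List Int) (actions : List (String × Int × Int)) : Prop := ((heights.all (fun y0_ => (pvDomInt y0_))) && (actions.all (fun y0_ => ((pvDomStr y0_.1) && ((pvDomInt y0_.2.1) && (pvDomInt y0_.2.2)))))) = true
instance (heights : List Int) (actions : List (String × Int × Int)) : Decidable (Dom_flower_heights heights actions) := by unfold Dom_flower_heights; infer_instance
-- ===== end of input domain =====

-- B replaces A's incrementally-built prefix-sum table by a suffix-sum table built with per-entry slice sums, answering queries as suffix[i] - suffix[j] (alternative decomposition; not faster).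


-- ===== PORT A =====
def flower_heights (heights : List Int) (actions : List (String × Int × Int)) : List Int :=
  let pre := heights.foldl (fun p h => p ++ [PySem.List.pyGetD p (-1) 0 + h]) [(0 : Int)]
  (actions.foldl (fun (st : List Int × Int) action =>
    if action.1 == "water" then
      (st.1, st.2 + 2)
    else
      let i := action.2.1 - 1
      let j := action.2.2
      let base := PySem.List.pyGetD pre j 0 - PySem.List.pyGetD pre i 0
      let days := j - i
      (st.1 ++ [base + st.2 * days], st.2)) ([], 0)).1

-- ===== PORT B =====
def flower_heights_alt (heights : List Int) (actions : List (String × Int × Int)) : List Int :=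
  let suffix := (PySem.List.pyRange 0 ((heights.length : Int) + 1) 1).map
      (fun k => (PySem.List.slice heights (some k) none).sum)
  (actions.foldl (fun (st : List Int × Int) action =>
    if action.1 == "water" then
      (st.1, st.2 + 2)
    else
      let i := action.2.1 - 1
      let j := action.2.2
      (st.1 ++ [PySem.List.pyGetD suffix i 0 - PySem.List.pyGetD suffix j 0 + st.2 * (j - i)],
       st.2)) ([], 0)).1

-- ===== PRECONDITION & SPEC =====
-- Pre_ excludes exactly the inputs where A raises IndexError: a non-"water" action whose index i-1 or j
-- falls outside the Python index range of the length-(len(heights)+1) table (B raises there too).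
def Pre_flower_heights (heights : List Int) (actions : List (String × Int × Int)) : Prop :=
  ∀ a ∈ actions, a.1 ≠ "water" →
    PySem.Raise.InRange (heights.length + 1) (a.2.1 - 1) ∧
    PySem.Raise.InRange (heights.length + 1) a.2.2
instance (heights : List Int) (actions : List (String × Int × Int)) : Decidable (Pre_flower_heights heights actions) := by unfold Pre_flower_heights; infer_instance
def pvWitness_flower_heights : List Int × (List (String × Int × Int)) :=
  ([1, 2, 3], [("water", 0, 0), ("grow", 1, 2), ("grow", 3, 3)])

def Spec_flower_heights (heights : List Int) (actions : List (String × Int × Int)) (out : List Int) : Prop := out = flower_heights_alt heights actions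
instance (heights : List Int) (actions : List (String × Int × Int)) (out : List Int) : Decidable (Spec_flower_heights heights actions out) := by unfold Spec_flower_heights; infer_instance

-- ===== CLAIM (what is proved, stated in full; the proofs are below) =====
def Claim_equal_flower_heights : Prop := ∀ (heights : List Int) (actions : List (String × Int × Int)), Dom_flower_heights heights actions → Pre_flower_heights heights actions → Spec_flower_heights heights actions (flower_heights heights actions)

-- ===== LEMMAS AND PROOFS =====

-- A's table-building loop yields the list of running sums: entry k is a + sum of the first k elements.
lemma prefix_fold_eq (hs acc : List Int) (a : Int) :
    hs.foldl (fun p h => p ++ [PySem.List.pyGetD p (-1) 0 + h]) (acc ++ [a])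
      = acc ++ (List.range (hs.length + 1)).map (fun k => a + (hs.take k).sum) := by
  induction hs generalizing acc a with
  | nil => simp
  | cons h t ih =>
    simp only [List.foldl_cons, PySem.List.pyGetD_neg_one_append_singleton]
    rw [ih (acc ++ [a]) (a + h), List.length_cons,
        List.range_succ_eq_map (n := t.length + 1)]
    simp only [List.map_cons, List.map_map, List.append_assoc, List.cons_append,
      List.take_zero, List.sum_nil, add_zero]
    refine congrArg _ (congrArg _ ?_)
    refine List.map_congr_left (fun k _ => ?_)
    simp [Function.comp, List.take_succ_cons, add_assoc]

-- B's table is the suffix sums, i.e. total minus prefix sums.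
lemma suffix_table_eq (heights : List Int) :
    (PySem.List.pyRange 0 ((heights.length : Int) + 1) 1).map
        (fun k => (PySem.List.slice heights (some k) none).sum)
      = (List.range (heights.length + 1)).map
          (fun k => heights.sum - (heights.take k).sum) := by
  rw [show ((heights.length : Int) + 1) = ((heights.length + 1 : Nat) : Int) by push_cast; ring,
      PySem.List.pyRange_zero_natCast, List.map_map]
  refine List.map_congr_left (fun k _ => ?_)
  simp only [Function.comp_apply, PySem.List.slice_from heights (Int.natCast_nonneg k),
    Int.toNat_natCast]
  have := List.take_append_drop k heights
  have hsum : (heights.take k).sum + (heights.drop k).sum = heights.sum := by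
    rw [← List.sum_append, this]
  omega

-- Python indexing (with negative wraparound) into a table of m mapped range entries.
lemma pyGetD_map_range_wrap (f : Nat → Int) (m : Nat) (k : Int)
    (hlo : -(m : Int) ≤ k) (hhi : k < m) :
    PySem.List.pyGetD ((List.range m).map f) k 0
      = f (if 0 ≤ k then k.toNat else m - (-k).toNat) := by
  by_cases h0 : 0 ≤ k
  · rw [PySem.List.pyGetD_eq_getElem _ 0 h0 (by simpa using hhi)]
    simp [h0]
  · have hk : k = -(((-k).toNat : Nat) : Int) := by omega
    rw [hk, PySem.List.pyGetD_neg_natCast _ _ _ (by omega) (by simp; omega)]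
    simp only [List.length_map, List.length_range, List.getElem_map, List.getElem_range]
    rw [if_neg (by omega)]
    congr 1
    omega

-- ===== VERDICT (by name: the statement is the Claim_ definition above) =====
theorem flower_heights_spec : Claim_equal_flower_heights := by
  intro heights actions _ hpre
  unfold Spec_flower_heights
  simp only [flower_heights, flower_heights_alt]
  rw [show [(0 : Int)] = ([] : List Int) ++ [(0 : Int)] from rfl, prefix_fold_eq,
      List.nil_append, suffix_table_eq]
  refine congrArg Prod.fst ?_
  refine PySem.List.foldl_congr_mem' _ _ _ _ (fun action hmem st => ?_)
  by_cases hw : action.1 == "water"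
  · simp [hw]
  · have hb := hpre action hmem (by simpa using hw)
    simp only [PySem.Raise.InRange] at hb
    simp only [hw, Bool.false_eq_true, if_false]
    rw [pyGetD_map_range_wrap _ _ _ (by push_cast; omega) (by push_cast; omega),
        pyGetD_map_range_wrap _ _ _ (by push_cast; omega) (by push_cast; omega),
        pyGetD_map_range_wrap _ _ _ (by push_cast; omega) (by push_cast; omega),
        pyGetD_map_range_wrap _ _ _ (by push_cast; omega) (by push_cast; omega)]
    refine congrArg (fun l => (l, st.2)) (congrArg (fun z => st.1 ++ [z]) ?_)
    ring
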